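-- pv_equiv track=rewrite | github.com/pypi-data/pypi-mirror-257 | packages/yangsuite-restconf/yangsuite_restconf-2.1.9.post0.dev9-py3-none-any.whl/ysrestconf/restconf.py | remove_path_params
-- ===== SOURCE A (Python) =====
-- def remove_path_params(path):
--     if '/' not in path and '=' not in path:
--         return path
--
--     tokens = path.split('/')
--     # Preserve token before equal sign for all path tokens
--     formatted_path = '/'.join([
--         token.split('=')[0]
--         if '=' in token else token
--         for token in tokens
--     ])
--     # Trim empty spaces
--     formatted_path = formatted_path.replace(' ', '')
--     # Trim invalid chars
--     formatted_path = formatted_path.replace('{', '')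
--     formatted_path = formatted_path.replace('}', '')
--
--     return formatted_path
-- ===== SOURCE B (Python) =====
-- def remove_path_params(path):
--     if '/' not in path and '=' not in path:
--         return path
--     out = []
--     skipping = False
--     for ch in path:
--         if ch == '/':
--             out.append(ch)
--             skipping = False
--         elif skipping:
--             pass
--         elif ch == '=':
--             skipping = True
--         elif ch not in ' {}':
--             out.append(ch)
--     return ''.join(out)
-- ===== Notes on version B (the rewrite author's own statement) =====
-- stated objective: alternative
-- what changed: Replaced the split/join list comprehension plus three full replace passes with a single character-by-character state-machine pass that drops the rest of a token after an equals sign and filters invalid characters on the fly.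
import Mathlib
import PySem

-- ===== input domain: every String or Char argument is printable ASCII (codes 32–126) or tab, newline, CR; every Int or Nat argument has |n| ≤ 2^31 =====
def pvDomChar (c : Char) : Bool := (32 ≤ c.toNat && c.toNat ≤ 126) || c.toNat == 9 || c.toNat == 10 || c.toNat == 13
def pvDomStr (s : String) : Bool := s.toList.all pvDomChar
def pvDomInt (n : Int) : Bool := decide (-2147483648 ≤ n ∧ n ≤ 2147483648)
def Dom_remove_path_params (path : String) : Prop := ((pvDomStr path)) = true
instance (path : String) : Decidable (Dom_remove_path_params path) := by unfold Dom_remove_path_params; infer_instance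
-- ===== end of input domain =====

-- B fuses A's split/join pass and three replace passes into one character-by-character pass with a skip flag (alternative decomposition, same result).

-- ===== PORT A =====
def remove_path_params (path : String) : String :=
  if !(PySem.Chars.isIn ['/'] path.toList) && !(PySem.Chars.isIn ['='] path.toList) then
    path
  else
    let tokens := PySem.Chars.splitOn path.toList ['/']
    let formatted_path := PySem.Chars.join ['/'] (tokens.map (fun token =>
      if PySem.Chars.isIn ['='] token then
        PySem.List.pyGetD (PySem.Chars.splitOn token ['=']) 0 []
      else token))
    let formatted_path2 := PySem.Chars.replace formatted_path [' '] []
    let formatted_path3 := PySem.Chars.replace formatted_path2 ['{'] []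
    let formatted_path4 := PySem.Chars.replace formatted_path3 ['}'] []
    String.ofList formatted_path4

-- ===== PORT B =====
-- the for-loop of Source B as structural recursion over the characters, carrying the 'skipping' flag
def rppGo : List Char → Bool → List Char
  | [], _ => []
  | c :: rest, skipping =>
    if c = '/' then c :: rppGo rest false
    else if skipping then rppGo rest true
    else if c = '=' then rppGo rest true
    else if c = ' ' ∨ c = '{' ∨ c = '}' then rppGo rest skipping
    else c :: rppGo rest skipping

def remove_path_params_alt (path : String) : String :=
  if !(PySem.Chars.isIn ['/'] path.toList) && !(PySem.Chars.isIn ['='] path.toList) then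
    path
  else
    String.ofList (rppGo path.toList false)

-- ===== PRECONDITION & SPEC =====
def Spec_remove_path_params (path : String) (out : String) : Prop := out = remove_path_params_alt path
instance (path : String) (out : String) : Decidable (Spec_remove_path_params path out) := by unfold Spec_remove_path_params; infer_instance

-- ===== CLAIM (what is proved, stated in full; the proofs are below) =====
def Claim_equal_remove_path_params : Prop := ∀ (path : String), Dom_remove_path_params path → Spec_remove_path_params path (remove_path_params path)

-- ===== LEMMAS AND PROOFS =====

-- proof-only abbreviations for A's pipeline pieces
def rppSplit (x : Char) : List Char → List (List Char)
  | [] => [[]]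
  | c :: r => if c = x then [] :: rppSplit x r else (rppSplit x r).modifyHead (c :: ·)

def rppTW (t : List Char) : List Char := t.takeWhile (fun c => !(c == '='))

def rppF (l : List Char) : List Char :=
  ((l.filter (fun c => !(c == ' '))).filter (fun c => !(c == '{'))).filter (fun c => !(c == '}'))

theorem rppSplit_ne_nil (x : Char) (l : List Char) : rppSplit x l ≠ [] := by
  cases l with
  | nil => simp [rppSplit]
  | cons c r =>
    simp only [rppSplit]
    split
    · simp
    · exact fun h => rppSplit_ne_nil x r (List.modifyHead_eq_nil_iff.mp h)

theorem rppSplit_head (x : Char) (t : List Char) :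
    ∃ r, rppSplit x t = t.takeWhile (fun c => !(c == x)) :: r := by
  induction t with
  | nil => exact ⟨[], rfl⟩
  | cons c rest ih =>
    obtain ⟨r, hr⟩ := ih
    by_cases hc : c = x
    · refine ⟨rppSplit x rest, ?_⟩
      simp [rppSplit, hc]
    · have hbc : (c == x) = false := beq_eq_false_iff_ne.mpr hc
      refine ⟨r, ?_⟩
      simp [rppSplit, hc, hr, hbc, List.modifyHead_cons]

-- Python replace with a single-char 'old' and empty 'new' is a filter
theorem rpp_takeWhile_self (t : List Char) (h : '=' ∉ t) :
    t.takeWhile (fun c => !(c == '=')) = t := by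
  induction t with
  | nil => rfl
  | cons a b ihb =>
    simp only [List.mem_cons, not_or] at h
    have hba : (a == '=') = false := beq_eq_false_iff_ne.mpr (fun e => h.1 e.symm)
    simp [hba, ihb h.2]

theorem rpp_replace_go_filter (x : Char) (l : List Char) : ∀ (acc : List Char) (fuel : Nat), l.length ≤ fuel →
    PySem.Chars.replace.go [x] [] fuel l acc = acc.reverse ++ l.filter (fun c => !(c == x)) := by
  induction l with
  | nil => intro acc fuel _; cases fuel <;> simp [PySem.Chars.replace.go]
  | cons c rest ih =>
    intro acc fuel h
    cases fuel with
    | zero => simp at h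
    | succ n =>
      have h' : rest.length ≤ n := by simp only [List.length_cons] at h; omega
      by_cases hc : c = x
      · subst hc
        have hpre : [c].isPrefixOf (c :: rest) = true := by simp [List.isPrefixOf]
        simp only [PySem.Chars.replace.go, hpre, if_true, List.length_cons, List.length_nil,
          List.drop_succ_cons, List.drop_zero, List.reverse_nil, List.nil_append]
        rw [ih acc n h']
        simp
      · have hpre : [x].isPrefixOf (c :: rest) = false := by simp [List.isPrefixOf, beq_eq_false_iff_ne.mpr (Ne.symm hc)]
        simp only [PySem.Chars.replace.go, hpre, Bool.false_eq_true, if_false]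
        rw [ih (c :: acc) n h']
        simp [hc]

theorem rpp_replace_filter (x : Char) (s : List Char) :
    PySem.Chars.replace s [x] [] = s.filter (fun c => !(c == x)) := by
  simpa [PySem.Chars.replace] using rpp_replace_go_filter x s [] s.length (le_refl _)

-- Python split on a single-char separator is the structural split rppSplit
theorem rpp_splitOn_go (x : Char) (l : List Char) : ∀ (cu : List Char) (acc : List (List Char)) (fuel : Nat),
    l.length ≤ fuel →
    PySem.Chars.splitOn.go [x] fuel l cu acc = acc.reverse ++ (rppSplit x l).modifyHead (cu.reverse ++ ·) := by
  induction l with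
  | nil => intro cu acc fuel _; cases fuel <;> simp [PySem.Chars.splitOn.go, rppSplit]
  | cons c rest ih =>
    intro cu acc fuel h
    obtain ⟨hd, tl, hsp⟩ := List.exists_cons_of_ne_nil (rppSplit_ne_nil x rest)
    cases fuel with
    | zero => simp at h
    | succ n =>
      have h' : rest.length ≤ n := by simp only [List.length_cons] at h; omega
      by_cases hc : c = x
      · subst hc
        have hpre : [c].isPrefixOf (c :: rest) = true := by simp [List.isPrefixOf]
        simp only [PySem.Chars.splitOn.go, hpre, if_true, List.length_cons, List.length_nil,
          List.drop_succ_cons, List.drop_zero]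
        rw [ih [] (cu.reverse :: acc) n h']
        simp [rppSplit, hsp]
      · have hpre : [x].isPrefixOf (c :: rest) = false := by simp [List.isPrefixOf, beq_eq_false_iff_ne.mpr (Ne.symm hc)]
        simp only [PySem.Chars.splitOn.go, hpre, Bool.false_eq_true, if_false]
        rw [ih (c :: cu) acc n h']
        simp [rppSplit, hc, hsp]

theorem rpp_splitOn (x : Char) (s : List Char) :
    PySem.Chars.splitOn s [x] = rppSplit x s := by
  obtain ⟨hd, tl, hsp⟩ := List.exists_cons_of_ne_nil (rppSplit_ne_nil x s)
  simp [PySem.Chars.splitOn, rpp_splitOn_go x s [] [] (s.length + 1) (by omega), hsp]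

-- token.split('=')[0] is takeWhile (≠ '='), with or without an '=' inside
theorem rpp_token_eq (t : List Char) :
    (if PySem.Chars.isIn ['='] t then PySem.List.pyGetD (PySem.Chars.splitOn t ['=']) 0 [] else t)
      = rppTW t := by
  by_cases hin : PySem.Chars.isIn ['='] t = true
  · obtain ⟨r, hr⟩ := rppSplit_head '=' t
    simp [hin, rpp_splitOn, hr, rppTW, PySem.List.pyGetD, PySem.List.pyGet?, PySem.List.pyIdx?]
  · have hmem : ('=' : Char) ∉ t := by
      intro hm
      obtain ⟨s, u, rfl⟩ := List.append_of_mem hm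
      have hinf : (['='] : List Char) <:+: s ++ '=' :: u := ⟨s, u, by simp⟩
      simp only [Bool.not_eq_true] at hin
      exact Iff.mp (PySem.Chars.isIn_eq_false_iff ['='] (s ++ '=' :: u)) hin hinf
    simp [hin, rppTW, rpp_takeWhile_self t hmem]

theorem rpp_ic2 (sep a y : List Char) (ys : List (List Char)) :
    sep.intercalate (a :: y :: ys) = a ++ sep ++ sep.intercalate (y :: ys) := by
  have hint : List.intersperse sep (a :: y :: ys) = a :: sep :: List.intersperse sep (y :: ys) := rfl
  simp [List.intercalate, hint]

theorem rpp_ic1 (c : Char) (y : List Char) (ys : List (List Char)) :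
    ['/'].intercalate ((c :: y) :: ys) = c :: ['/'].intercalate (y :: ys) := by
  cases ys with
  | nil => simp [List.intercalate]
  | cons z zs => rw [rpp_ic2, rpp_ic2]; simp

theorem rppF_cons (c : Char) (l : List Char) :
    rppF (c :: l) = if c = ' ' ∨ c = '{' ∨ c = '}' then rppF l else c :: rppF l := by
  by_cases h : c = ' ' ∨ c = '{' ∨ c = '}'
  · rcases h with h | h | h <;> subst h <;> simp [rppF]
  · simp only [not_or] at h
    simp [rppF, h.1, h.2.1, h.2.2]

-- the fused single pass computes A's pipeline, for both values of the skip flag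
theorem rpp_main (cs : List Char) :
    rppF (['/'].intercalate ((rppSplit '/' cs).map rppTW)) = rppGo cs false
    ∧ rppF (['/'].intercalate ([] :: ((rppSplit '/' cs).map rppTW).tail)) = rppGo cs true := by
  induction cs with
  | nil => constructor <;> simp [rppSplit, rppTW, rppF, rppGo, List.intercalate]
  | cons c r ih =>
    obtain ⟨ih1, ih2⟩ := ih
    obtain ⟨h, t, hsp⟩ := List.exists_cons_of_ne_nil (rppSplit_ne_nil '/' r)
    rw [hsp, List.map_cons] at ih1
    rw [hsp, List.map_cons, List.tail_cons] at ih2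
    by_cases hc : c = '/'
    · subst hc
      have hsp2 : rppSplit '/' ('/' :: r) = [] :: h :: t := by simp [rppSplit, hsp]
      have hstep : rppF (['/'].intercalate ((List.map rppTW ([] :: h :: t))))
          = '/' :: rppF (['/'].intercalate (rppTW h :: List.map rppTW t)) := by
        rw [List.map_cons, List.map_cons, show rppTW ([] : List Char) = [] from rfl, rpp_ic2]
        simp only [List.nil_append, List.singleton_append]
        rw [rppF_cons, if_neg (by decide)]
      constructor
      · rw [hsp2, hstep, ih1]
        simp [rppGo]
      · rw [hsp2, List.map_cons, List.map_cons, List.tail_cons,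
          show ([] : List Char) :: rppTW h :: List.map rppTW t
            = List.map rppTW ([] :: h :: t) from by simp [rppTW],
          hstep, ih1]
        simp [rppGo]
    · have hsp' : rppSplit '/' (c :: r) = (c :: h) :: t := by simp [rppSplit, hc, hsp]
      by_cases he : c = '='
      · subst he
        have htw : rppTW ('=' :: h) = [] := by simp [rppTW]
        constructor
        · rw [hsp', List.map_cons, htw, ih2]
          simp [rppGo]
        · rw [hsp', List.map_cons, List.tail_cons, ih2]
          simp [rppGo, hc]
      · have hbe : (c == '=') = false := beq_eq_false_iff_ne.mpr he
        have htw : rppTW (c :: h) = c :: rppTW h := by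
          simp [rppTW, hbe]
        constructor
        · rw [hsp', List.map_cons, htw, rpp_ic1, rppF_cons]
          by_cases hj : c = ' ' ∨ c = '{' ∨ c = '}'
          · rw [if_pos hj, ih1]
            simp only [rppGo, if_neg hc, if_neg he, if_pos hj]
            simp
          · rw [if_neg hj, ih1]
            simp only [rppGo, if_neg hc, if_neg he, if_neg hj]
            simp
        · rw [hsp', List.map_cons, List.tail_cons, ih2]
          simp [rppGo, hc]

-- ===== VERDICT (by name: the statement is the Claim_ definition above) =====
theorem remove_path_params_spec : Claim_equal_remove_path_params := by
  intro path _
  unfold Spec_remove_path_params remove_path_params remove_path_params_alt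
  by_cases hg : (!(PySem.Chars.isIn ['/'] path.toList) && !(PySem.Chars.isIn ['='] path.toList)) = true
  · simp [hg]
  · simp only [hg, Bool.false_eq_true, if_false]
    have hmap : (PySem.Chars.splitOn path.toList ['/']).map (fun token =>
        if PySem.Chars.isIn ['='] token then
          PySem.List.pyGetD (PySem.Chars.splitOn token ['=']) 0 []
        else token)
        = (rppSplit '/' path.toList).map rppTW := by
      rw [rpp_splitOn]
      exact List.map_congr_left (fun tk _ => rpp_token_eq tk)
    rw [hmap, PySem.Chars.join, rpp_replace_filter, rpp_replace_filter, rpp_replace_filter]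
    have hfin := (rpp_main path.toList).1
    simp only [rppF] at hfin
    rw [hfin]
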